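-- pv_equiv track=rewrite | github.com/PiNet/PiNet | Scripts/pinet_functions_python.py | find_replace_any_line
-- ===== SOURCE A (Python) =====
-- def find_replace_any_line(text_file, string, new_string):
--     """
--     Basic find and replace function for entire line.
--     Pass it a text file in list form and it will search for strings.
--     If it finds a string, it will replace the entire line with new_string
--     """
--     unfound = True
--     for i in range(0, len(text_file)):
--         found = text_file[i].find(string)
--         if (found != -1):
--             text_file[i] = new_string
--             unfound = False
--     if unfound:
--         text_file.append(new_string)
--
--     return text_file
-- ===== SOURCE B (Python) =====
-- def find_replace_any_line(text_file, string, new_string):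
--     """
--     Replace every line containing `string` with `new_string`; if no line
--     contains it, append `new_string`.  Rebuilds text_file in place by
--     consuming a reversed stack of its lines (mutates and returns the same
--     object, like the original).
--     """
--     pending = text_file[::-1]          # stack; top (= last element) is the first line
--     text_file.clear()
--     matched = False
--     while pending:
--         line = pending.pop()
--         if line.find(string) != -1:
--             text_file.append(new_string)
--             matched = True
--         else:
--             text_file.append(line)
--     if not matched:
--         text_file.append(new_string)
--     return text_file
-- ===== Notes on version B (the rewrite author's own statement) =====
-- stated objective: alternative
-- what changed: Instead of an index loop over range(len) assigning text_file[i] with a running 'unfound' flag, B empties the list and rebuilds it in place by popping lines off a reversed stack, appending the replacement or the original line as it goes.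
import Mathlib
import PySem

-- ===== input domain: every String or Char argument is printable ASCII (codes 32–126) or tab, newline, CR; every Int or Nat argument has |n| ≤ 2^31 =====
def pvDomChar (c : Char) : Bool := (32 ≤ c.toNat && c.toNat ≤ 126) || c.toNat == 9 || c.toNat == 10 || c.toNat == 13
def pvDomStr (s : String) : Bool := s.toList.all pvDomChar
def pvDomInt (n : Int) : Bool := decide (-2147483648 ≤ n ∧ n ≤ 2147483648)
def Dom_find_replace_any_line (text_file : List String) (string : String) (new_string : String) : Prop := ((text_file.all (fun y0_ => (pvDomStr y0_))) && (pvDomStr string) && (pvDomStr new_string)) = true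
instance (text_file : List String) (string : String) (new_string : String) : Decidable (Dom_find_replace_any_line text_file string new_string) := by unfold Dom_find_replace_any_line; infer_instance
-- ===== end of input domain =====

-- B rebuilds the list in place by consuming a reversed stack of its lines instead of
-- A's index loop with a running 'unfound' flag; both Pythons mutate text_file in place
-- and return it — the equivalence proved here is about the return value.

-- ===== PORT A =====
-- one step of the 'for i in range(0, len(text_file))' loop; state = (list, unfound)
-- the index i comes from range(0, len), so it is a valid nonnegative index and
-- 'st.1.set i.toNat new_string' is exactly Python's 'text_file[i] = new_string'
def pvStepA (string new_string : String) (st : List String × Bool) (i : Int) : List String × Bool :=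
  let found := PySem.Str.find (PySem.List.pyGetD st.1 i "") string
  if found ≠ -1 then (st.1.set i.toNat new_string, false) else st

def find_replace_any_line (text_file : List String) (string : String) (new_string : String) : List String :=
  let st := (PySem.List.pyRange 0 (text_file.length : Int) 1).foldl (pvStepA string new_string) (text_file, true)
  if st.2 then st.1 ++ [new_string] else st.1

-- ===== PORT B =====
-- the 'while pending: line = pending.pop(); …' loop of Source B: pop takes the LAST
-- element of `pending`; state = (text_file being rebuilt, matched flag)
def pvLoopB (string new_string : String) (pending acc : List String) (matched : Bool) : List String × Bool :=
  if h : pending = [] then (acc, matched)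
  else
    let line := pending.getLast h
    if PySem.Str.find line string ≠ -1 then
      pvLoopB string new_string pending.dropLast (acc ++ [new_string]) true
    else
      pvLoopB string new_string pending.dropLast (acc ++ [line]) matched
termination_by pending.length
decreasing_by all_goals { have := List.length_pos_of_ne_nil h; simp [List.length_dropLast]; omega }

def find_replace_any_line_alt (text_file : List String) (string : String) (new_string : String) : List String :=
  -- pending = text_file[::-1]; text_file.clear()
  let st := pvLoopB string new_string (((PySem.List.slice? text_file none none (-1)).getD [])) [] false
  if !st.2 then st.1 ++ [new_string] else st.1

-- ===== PRECONDITION & SPEC =====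
def Spec_find_replace_any_line (text_file : List String) (string : String) (new_string : String) (out : List String) : Prop := out = find_replace_any_line_alt text_file string new_string
instance (text_file : List String) (string : String) (new_string : String) (out : List String) : Decidable (Spec_find_replace_any_line text_file string new_string out) := by unfold Spec_find_replace_any_line; infer_instance

-- ===== CLAIM (what is proved, stated in full; the proofs are below) =====
def Claim_equal_find_replace_any_line : Prop := ∀ (text_file : List String) (string : String) (new_string : String), Dom_find_replace_any_line text_file string new_string → Spec_find_replace_any_line text_file string new_string (find_replace_any_line text_file string new_string)

-- ===== LEMMAS AND PROOFS =====

theorem pvFind_ne_neg_one_iff (s string : String) :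
    (PySem.Str.find s string ≠ -1) ↔ PySem.Str.isIn string s = true := by
  simp [PySem.Chars.find_eq_neg_one_iff, PySem.Chars.isIn_iff_infix]

-- A's loop, run on the indices of the suffix `suf` of the current list `pre ++ suf`,
-- replaces each matching line of `suf` and clears the flag iff some line matched.
theorem pvLoopA_spec (string new_string : String) (suf pre : List String) (u : Bool) :
    (PySem.List.pyRange (pre.length : Int) ((pre.length : Int) + (suf.length : Int)) 1).foldl
        (pvStepA string new_string) (pre ++ suf, u)
      = (pre ++ suf.map (fun line => if PySem.Str.isIn string line then new_string else line),
         u && !(suf.any (fun line => PySem.Str.isIn string line))) := by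
  induction suf generalizing pre u with
  | nil => simp [PySem.List.pyRange_one_eq_nil]
  | cons s rest ih =>
    rw [PySem.List.pyRange_one_cons (by simp only [List.length_cons]; push_cast; omega)]
    simp only [List.foldl_cons]
    have hget : PySem.List.pyGetD (pre ++ s :: rest) (pre.length : Int) "" = s := by
      rw [PySem.List.pyGetD_natCast]
      simp
    by_cases hp : PySem.Str.isIn string s = true
    · have hp' : PySem.Chars.isIn string.toList s.toList = true := by simpa using hp
      have hset : (pre ++ s :: rest).set ((pre.length : Int)).toNat new_string
          = (pre ++ [new_string]) ++ rest := by
        simp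
      rw [show pvStepA string new_string (pre ++ s :: rest, u) (pre.length : Int)
            = ((pre ++ [new_string]) ++ rest, false) by
        unfold pvStepA
        rw [hget, if_pos ((pvFind_ne_neg_one_iff s string).mpr hp), hset]]
      have h2 := ih (pre ++ [new_string]) false
      simp only [List.length_append, List.length_cons, List.length_nil,
        Nat.cast_add, Nat.cast_one, zero_add] at h2 ⊢
      rw [show ((pre.length : Int) + ((rest.length : Int) + 1))
            = (pre.length : Int) + 1 + (rest.length : Int) by ring]
      rw [h2]
      simp [hp']
    · have hp' : PySem.Chars.isIn string.toList s.toList = false := by simpa using hp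
      rw [show pvStepA string new_string (pre ++ s :: rest, u) (pre.length : Int)
            = ((pre ++ [s]) ++ rest, u) by
        unfold pvStepA
        rw [hget, if_neg (fun h => hp ((pvFind_ne_neg_one_iff s string).mp h))]
        simp]
      have h2 := ih (pre ++ [s]) u
      simp only [List.length_append, List.length_cons, List.length_nil,
        Nat.cast_add, Nat.cast_one, zero_add] at h2 ⊢
      rw [show ((pre.length : Int) + ((rest.length : Int) + 1))
            = (pre.length : Int) + 1 + (rest.length : Int) by ring]
      rw [h2]
      simp [hp']

-- B's stack loop on pending = l.reverse rebuilds acc ++ (l with matches replaced)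
-- and sets the flag iff some line of l matched.
theorem pvLoopB_spec (string new_string : String) (l acc : List String) (m : Bool) :
    pvLoopB string new_string l.reverse acc m
      = (acc ++ l.map (fun line => if PySem.Str.isIn string line then new_string else line),
         m || l.any (fun line => PySem.Str.isIn string line)) := by
  induction l generalizing acc m with
  | nil => simp [pvLoopB]
  | cons x xs ih =>
    have hne : xs.reverse ++ [x] ≠ [] := by simp
    rw [List.reverse_cons, pvLoopB, dif_neg hne]
    simp only [List.getLast_append_singleton, List.dropLast_concat]
    by_cases hp : PySem.Str.isIn string x = true
    · rw [if_pos ((pvFind_ne_neg_one_iff x string).mpr hp), ih]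
      simp [show PySem.Chars.isIn string.toList x.toList = true from by simpa using hp]
    · rw [if_neg (fun h => hp ((pvFind_ne_neg_one_iff x string).mp h)), ih]
      simp [show PySem.Chars.isIn string.toList x.toList = false from by simpa using hp]

-- ===== VERDICT (by name: the statement is the Claim_ definition above) =====
theorem find_replace_any_line_spec : Claim_equal_find_replace_any_line := by
  intro tf s ns _
  unfold Spec_find_replace_any_line find_replace_any_line find_replace_any_line_alt
  have hmain := pvLoopA_spec s ns tf [] true
  simp only [List.nil_append, List.length_nil, Nat.cast_zero, zero_add, Bool.true_and] at hmain
  have hrev : ((PySem.List.slice? tf none none (-1)).getD []) = tf.reverse := by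
    rw [PySem.List.slice?_none_none_neg_one]; rfl
  have hB := pvLoopB_spec s ns tf [] false
  simp only [List.nil_append, Bool.false_or] at hB
  rw [hmain, hrev, hB]
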